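-- pv_equiv track=rewrite | github.com/violetahoza/face_detection | feature_extraction.py | _get_uniform_pattern
-- ===== SOURCE A (Python) =====
-- def _get_uniform_pattern(pattern, P):
--
--     # Count transitions (0->1 or 1->0)
--     transitions = 0
--     for i in range(P):
--         bit_current = (pattern >> i) & 1
--         bit_next = (pattern >> ((i + 1) % P)) & 1
--         if bit_current != bit_next:
--             transitions += 1
--
--     # Uniform pattern has <= 2 transitions
--     if transitions <= 2:
--         # Count number of 1s (this is the uniform pattern code)
--         return bin(pattern).count('1')
--     else:
--         # Non-uniform pattern: assign to last bin
--         return P * (P - 1) + 2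
-- ===== SOURCE B (Python) =====
-- def _get_uniform_pattern(pattern, P):
--     # Bit-parallel: the bits of x mark the circular transitions; uniform
--     # (<= 2 transitions) iff x has at most two set bits, tested by clearing
--     # the lowest set bit twice (Kernighan) instead of looping over bits.
--     if P <= 0:
--         return bin(pattern).count('1')
--     mask = (1 << P) - 1
--     m = pattern & mask
--     rot = ((m >> 1) | (m << (P - 1))) & mask
--     x = m ^ rot
--     y = x & (x - 1)
--     if y & (y - 1) == 0:
--         return bin(pattern).count('1')
--     return P * (P - 1) + 2
-- ===== Notes on version B (the rewrite author's own statement) =====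
-- stated objective: faster
-- what changed: Replaces the per-bit Python loop counting circular transitions by bit-parallel arithmetic: the masked pattern XORed with its 1-bit circular rotation marks the transitions, and 'at most 2 transitions' is tested by clearing the lowest set bit twice (Kernighan) instead of counting per bit.
import Mathlib
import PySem

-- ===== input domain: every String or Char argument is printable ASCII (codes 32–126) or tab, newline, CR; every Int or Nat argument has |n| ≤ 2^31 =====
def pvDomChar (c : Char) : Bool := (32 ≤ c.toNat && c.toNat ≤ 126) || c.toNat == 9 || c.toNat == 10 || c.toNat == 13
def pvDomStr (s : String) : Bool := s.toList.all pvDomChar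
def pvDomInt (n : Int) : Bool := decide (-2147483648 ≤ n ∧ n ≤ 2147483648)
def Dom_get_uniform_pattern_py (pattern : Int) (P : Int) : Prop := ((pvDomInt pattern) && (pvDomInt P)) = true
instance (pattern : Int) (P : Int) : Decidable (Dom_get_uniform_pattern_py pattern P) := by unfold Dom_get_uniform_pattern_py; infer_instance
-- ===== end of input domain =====

-- B replaces A's per-bit transition loop by bit-parallel arithmetic: the masked pattern XOR
-- its 1-bit circular rotation marks the transitions; uniformity (≤ 2 transitions) is tested by
-- clearing the lowest set bit twice (objective: faster, measured).

-- ===== PORT A =====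
-- bin(x).count('1') counts the binary digits '1' of |x| : PySem.Int.bitCount (Python-exact).
def get_uniform_pattern_py (pattern : Int) (P : Int) : Int :=
  let transitions : Int :=
    (PySem.List.pyRange 0 P 1).foldl (fun transitions i =>
      let bit_current := PySem.Int.band (pattern >>> i.toNat) 1
      let bit_next := PySem.Int.band (pattern >>> (PySem.Int.mod (i + 1) P).toNat) 1
      if bit_current ≠ bit_next then transitions + 1 else transitions) 0
  if transitions ≤ 2 then (PySem.Int.bitCount pattern : Int)
  else P * (P - 1) + 2

-- ===== PORT B =====
def get_uniform_pattern_py_alt (pattern : Int) (P : Int) : Int :=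
  if P ≤ 0 then (PySem.Int.bitCount pattern : Int)
  else
    let mask : Int := (1 <<< P.toNat) - 1
    let m : Int := PySem.Int.band pattern mask
    let rot : Int := PySem.Int.band (PySem.Int.bor (m >>> 1) (m <<< (P - 1).toNat)) mask
    let x : Int := PySem.Int.bxor m rot
    let y : Int := PySem.Int.band x (x - 1)
    if PySem.Int.band y (y - 1) = 0 then (PySem.Int.bitCount pattern : Int)
    else P * (P - 1) + 2

-- ===== PRECONDITION & SPEC =====
def Spec_get_uniform_pattern_py (pattern : Int) (P : Int) (out : Int) : Prop := out = get_uniform_pattern_py_alt pattern P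
instance (pattern : Int) (P : Int) (out : Int) : Decidable (Spec_get_uniform_pattern_py pattern P out) := by unfold Spec_get_uniform_pattern_py; infer_instance

-- ===== CLAIM (what is proved, stated in full; the proofs are below) =====
def Claim_equal_get_uniform_pattern_py : Prop := ∀ (pattern : Int) (P : Int), Dom_get_uniform_pattern_py pattern P → Spec_get_uniform_pattern_py pattern P (get_uniform_pattern_py pattern P)

-- ===== LEMMAS AND PROOFS =====

-- casting shifts of a Nat through Int
theorem pvShiftLeft_natCast (m k : Nat) : (m : Int) <<< k = ((m <<< k : Nat) : Int) := rfl

-- Python's  x & (2^n - 1)  is  x mod 2^n  (also for negative x)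

-- the i-th bit A tests equals the i-th bit of the masked pattern, for i < n

-- bitCount of a Nat below 2^n is the number of set bits among the first n

-- bits of the 1-bit circular rotation

theorem pvBand_mask (a : Int) (n : Nat) :
    PySem.Int.band a ((2 : Int) ^ n - 1) = a % (2 : Int) ^ n := by
  have h2 : ((2 : Int) ^ n) = ((2 ^ n : Nat) : Int) := by push_cast; ring
  have hpos : 0 < 2 ^ n := Nat.two_pow_pos n
  have ht : ((2 : Int) ^ n - 1).toNat = 2 ^ n - 1 := by omega
  by_cases ha : 0 ≤ a
  · rw [PySem.Int.band_of_nonneg ha (by omega), ht, Nat.and_two_pow_sub_one_eq_mod]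
    rw [h2, Int.natCast_emod, Int.toNat_of_nonneg ha]
  · have hb : (0 : Int) ≤ (2 : Int) ^ n - 1 := by omega
    simp only [PySem.Int.band, if_neg ha, if_pos hb]
    rw [ht, Nat.land_comm, Nat.and_two_pow_sub_one_eq_mod]
    set q : Nat := (-a - 1).toNat with hq
    have haq : a = -((q : Int) + 1) := by omega
    have hqd : 2 ^ n * ((q / 2 ^ n : Nat) : Int) + ((q % 2 ^ n : Nat) : Int) = (q : Int) := by
      rw [h2]; exact_mod_cast congrArg (fun m : Nat => (m : Int)) (Nat.div_add_mod q (2 ^ n))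
    have hql : q % 2 ^ n < 2 ^ n := Nat.mod_lt _ hpos
    have hcast : (((2 ^ n - 1 - q % 2 ^ n : Nat)) : Int) = (2 : Int) ^ n - 1 - ((q % 2 ^ n : Nat) : Int) := by
      rw [h2]; omega
    have key : a = ((2 : Int) ^ n - 1 - ((q % 2 ^ n : Nat) : Int)) + 2 ^ n * (-(((q / 2 ^ n : Nat)) : Int) - 1) := by
      rw [haq]; rw [← hqd]; ring
    rw [hcast, key, Int.add_mul_emod_self_left, Int.emod_eq_of_lt (by omega) (by omega)]
theorem pvBit_eq_testBit (a : Int) (n i : Nat) (h : i < n) :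
    (PySem.Int.band (a >>> i) 1 = 1) ↔ (a % (2 : Int) ^ n).toNat.testBit i := by
  have hi2 : ((2 : Int) ^ i) = ((2 ^ i : Nat) : Int) := by push_cast; ring
  have hnpos : (0 : Int) < 2 ^ n := by positivity
  have he : (0 : Int) ≤ a % 2 ^ n := Int.emod_nonneg a (by omega)
  set e : Int := a % 2 ^ n with hedef
  set t : Int := a / 2 ^ n with htdef
  have hsplit : a = e + (2 ^ (n - i - 1) * t * 2) * 2 ^ i := by
    have h1 : e + 2 ^ n * t = a := Int.emod_add_mul_ediv a (2 ^ n)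
    have h2 : (2 : Int) ^ n = 2 ^ (n - i - 1) * 2 * 2 ^ i := by
      rw [← pow_succ, ← pow_add]
      congr 1; omega
    rw [← h1, h2]; ring
  have hdiv : a / 2 ^ i = e / 2 ^ i + 2 ^ (n - i - 1) * t * 2 := by
    rw [hsplit, Int.add_mul_ediv_right _ _ (by positivity : ((2:Int) ^ i) ≠ 0)]
  have hmod : a / 2 ^ i % 2 = e / 2 ^ i % 2 := by
    rw [hdiv, mul_comm ((2:Int) ^ (n-i-1) * t) 2, Int.add_mul_emod_self_left]
  rw [PySem.Int.band_one, PySem.Int.mod_eq_emod_of_pos (by norm_num), Int.shiftRight_eq_div_pow,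
      Nat.testBit_eq_decide_div_mod_eq]
  rw [← hi2, hmod]
  constructor
  · intro hh
    have : (e.toNat / 2 ^ i % 2 : Int) = 1 := by
      rw [Int.toNat_of_nonneg he]
      exact hh
    simp [(by exact_mod_cast this : e.toNat / 2 ^ i % 2 = 1)]
  · intro hh
    have h1 : e.toNat / 2 ^ i % 2 = 1 := by simpa using hh
    have : ((e.toNat / 2 ^ i % 2 : Nat) : Int) = 1 := by exact_mod_cast h1
    push_cast at this
    rw [Int.toNat_of_nonneg he] at this
    exact this
theorem pvBitCount_eq_countP (n : Nat) : ∀ k : Nat, k < 2 ^ n →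
    PySem.Int.bitCount (k : Int) = (List.range n).countP (fun i => k.testBit i) := by
  induction n with
  | zero =>
    intro k hk
    interval_cases k
    simp [PySem.Int.bitCount_zero]
  | succ n ih =>
    intro k hk
    rcases Nat.eq_zero_or_pos k with hk0 | hk0
    · subst hk0
      simp [PySem.Int.bitCount_zero, Nat.zero_testBit]
    · rw [PySem.Int.bitCount_natCast hk0]
      have hk2 : k / 2 < 2 ^ n := by
        rw [Nat.div_lt_iff_lt_mul (by norm_num)]
        calc k < 2 ^ (n + 1) := hk
          _ = 2 ^ n * 2 := by rw [pow_succ]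
      rw [ih (k / 2) hk2, List.range_succ_eq_map, List.countP_cons, List.countP_map]
      have hcomp : ((fun i => k.testBit i) ∘ Nat.succ) = (fun i => (k / 2).testBit i) := by
        funext i
        simp [Function.comp, Nat.testBit_succ]
      rw [hcomp]
      by_cases h0 : k % 2 = 1
      · simp [Nat.testBit_zero, h0, Nat.add_comm]
      · simp [Nat.testBit_zero, h0]
        omega
theorem pvRot_testBit (mN n i : Nat) (hm : mN < 2 ^ n) (hn : 0 < n) (h : i < n) :
    (((mN >>> 1) ||| (mN <<< (n - 1))) &&& (2 ^ n - 1)).testBit i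
      = mN.testBit ((i + 1) % n) := by
  rw [Nat.testBit_land, Nat.testBit_lor, Nat.testBit_shiftRight, Nat.testBit_shiftLeft,
      Nat.testBit_two_pow_sub_one]
  by_cases hi : i < n - 1
  · have h1 : (i + 1) % n = i + 1 := Nat.mod_eq_of_lt (by omega)
    have h2 : ¬ (i ≥ n - 1) := by omega
    simp [h1, h2, h, Nat.add_comm 1 i]
  · have hi' : i = n - 1 := by omega
    subst hi'
    have h1 : (n - 1 + 1) % n = 0 := by simp [Nat.sub_add_cancel hn]
    have h3 : mN.testBit (1 + (n - 1)) = false := by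
      apply Nat.testBit_lt_two_pow
      calc mN < 2 ^ n := hm
        _ ≤ 2 ^ (1 + (n - 1)) := Nat.pow_le_pow_right (by norm_num) (by omega)
    simp [h1, h3, h, Nat.testBit_zero]

theorem pvBc_two_mul (z : Nat) : PySem.Int.bitCount ((2 * z : Nat) : Int) = PySem.Int.bitCount (z : Int) := by
  rcases Nat.eq_zero_or_pos z with h | h
  · subst h; rfl
  · rw [PySem.Int.bitCount_natCast (by omega : 0 < 2 * z)]
    have h1 : 2 * z % 2 = 0 := by omega
    have h2 : 2 * z / 2 = z := by omega
    rw [h1, h2]; omega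

theorem pvBc_two_mul_add_one (z : Nat) : PySem.Int.bitCount ((2 * z + 1 : Nat) : Int) = PySem.Int.bitCount (z : Int) + 1 := by
  rw [PySem.Int.bitCount_natCast (by omega : 0 < 2 * z + 1)]
  have h1 : (2 * z + 1) % 2 = 1 := by omega
  have h2 : (2 * z + 1) / 2 = z := by omega
  rw [h1, h2]; omega

theorem pvLand_odd_even (m : Nat) : (2 * m + 1) &&& (2 * m) = 2 * m := by
  have := Nat.land_bit true m false m
  simpa [Nat.bit, Nat.and_self, two_mul] using this

theorem pvLand_even_pred (m : Nat) (hm : 0 < m) : (2 * m) &&& (2 * m - 1) = 2 * (m &&& (m - 1)) := by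
  have := Nat.land_bit false m true (m - 1)
  have h1 : 2 * m - 1 = 2 * (m - 1) + 1 := by omega
  rw [h1]
  simpa [Nat.bit, two_mul] using this

theorem pvBc_pos (x : Nat) (hx : 0 < x) : 0 < PySem.Int.bitCount (x : Int) := by
  induction x using Nat.strong_induction_on with
  | _ x ih =>
    rw [PySem.Int.bitCount_natCast hx]
    rcases Nat.even_or_odd x with ⟨m, hmx⟩ | ⟨m, hmx⟩
    · have hm : 0 < m := by omega
      have := ih (x / 2) (by omega) (by omega)
      omega
    · omega

theorem pvBc_land_pred (x : Nat) (hx : 0 < x) :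
    PySem.Int.bitCount ((x &&& (x - 1) : Nat) : Int) = PySem.Int.bitCount (x : Int) - 1 := by
  induction x using Nat.strong_induction_on with
  | _ x ih =>
    rcases Nat.even_or_odd x with ⟨m, hmx⟩ | ⟨m, hmx⟩
    · -- even: x = 2m, m > 0
      have hm : 0 < m := by omega
      have hx2 : x = 2 * m := by omega
      subst hx2
      rw [pvLand_even_pred m hm, pvBc_two_mul, pvBc_two_mul, ih m (by omega) hm]
    · -- odd: x = 2m+1
      have hx2 : x = 2 * m + 1 := by omega
      subst hx2
      have h1 : 2 * m + 1 - 1 = 2 * m := by omega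
      rw [h1, pvLand_odd_even, pvBc_two_mul, pvBc_two_mul_add_one]
      omega

theorem pvKernighan (x : Nat) :
    ((x &&& (x - 1)) &&& ((x &&& (x - 1)) - 1) = 0) ↔ PySem.Int.bitCount (x : Int) ≤ 2 := by
  rcases Nat.eq_zero_or_pos x with hx | hx
  · subst hx; simp
  · set y : Nat := x &&& (x - 1) with hy
    have hby : PySem.Int.bitCount (y : Int) = PySem.Int.bitCount (x : Int) - 1 := pvBc_land_pred x hx
    have hbx := pvBc_pos x hx
    rcases Nat.eq_zero_or_pos y with hy0 | hy0
    · rw [hy0]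
      have : PySem.Int.bitCount ((0 : Nat) : Int) = 0 := rfl
      simp only [Nat.zero_and]
      constructor
      · intro _
        -- bitCount x - 1 = bitCount y = 0
        rw [hy0] at hby
        have : PySem.Int.bitCount ((0:Nat) : Int) = 0 := rfl
        omega
      · intro _; trivial
    · have hbz := pvBc_land_pred y hy0
      have hby' := pvBc_pos y hy0
      constructor
      · intro h
        rw [h] at hbz
        have : PySem.Int.bitCount ((0:Nat) : Int) = 0 := rfl
        omega
      · intro h
        by_contra hne
        have hz0 : 0 < y &&& (y - 1) := Nat.pos_of_ne_zero hne
        have := pvBc_pos _ hz0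
        omega

theorem pvBit01 (a : Int) (i : Nat) :
    PySem.Int.band (a >>> i) 1 = 0 ∨ PySem.Int.band (a >>> i) 1 = 1 := by
  rw [PySem.Int.band_one]
  have h1 := PySem.Int.mod_nonneg (a >>> i) (by norm_num : (0:Int) < 2)
  have h2 := PySem.Int.mod_lt (a >>> i) (by norm_num : (0:Int) < 2)
  omega

theorem pvMain (a : Int) (P : Int) :
    get_uniform_pattern_py a P = get_uniform_pattern_py_alt a P := by
  unfold get_uniform_pattern_py get_uniform_pattern_py_alt
  simp only []
  by_cases hP : P ≤ 0
  · rw [PySem.List.pyRange_one_eq_nil hP]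
    simp [hP]
  · rw [not_le] at hP
    set n : Nat := P.toNat with hndef
    have hPn : P = (n : Int) := by omega
    have hn : 0 < n := by omega
    have hmask : (1 : Int) <<< P.toNat - 1 = ((2 ^ n - 1 : Nat) : Int) := by
      have h1 : (1 : Int) <<< P.toNat = ((2 ^ n : Nat) : Int) := by
        rw [show (1 : Int) = ((1 : Nat) : Int) from rfl, pvShiftLeft_natCast, Nat.one_shiftLeft, hndef]
      have : 0 < 2 ^ n := Nat.two_pow_pos n
      omega
    have hmask' : ((2 ^ n - 1 : Nat) : Int) = (2 : Int) ^ n - 1 := by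
      have : 0 < 2 ^ n := Nat.two_pow_pos n
      push_cast [this]
      omega
    -- the masked pattern
    set e : Int := a % (2 : Int) ^ n with hedef
    have hm : PySem.Int.band a ((2 ^ n - 1 : Nat) : Int) = e := by
      rw [hmask']; exact pvBand_mask a n
    have he0 : 0 ≤ e := Int.emod_nonneg a (by positivity)
    set mN : Nat := e.toNat with hmNdef
    have heN : e = (mN : Int) := by omega
    have hmNlt : mN < 2 ^ n := by
      have : e < (2 : Int) ^ n := Int.emod_lt_of_pos a (by positivity)
      have h2 : ((2 : Int) ^ n) = ((2 ^ n : Nat) : Int) := by push_cast; ring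
      omega
    set rotN : Nat := ((mN >>> 1) ||| (mN <<< (n - 1))) &&& (2 ^ n - 1) with hrotdef
    have hco : (P - 1).toNat = n - 1 := by omega
    -- B's rot as a Nat
    have hrot : PySem.Int.band
        (PySem.Int.bor (PySem.Int.band a ((2 ^ n - 1 : Nat) : Int) >>> 1)
          (PySem.Int.band a ((2 ^ n - 1 : Nat) : Int) <<< (P - 1).toNat))
        ((2 ^ n - 1 : Nat) : Int) = (rotN : Int) := by
      rw [hm, heN, hco]
      rw [show ((mN : Int) >>> (1 : Int)) = ((mN >>> 1 : Nat) : Int) from rfl,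
          pvShiftLeft_natCast, PySem.Int.bor_natCast, PySem.Int.band_natCast]
    have hxorlt : mN ^^^ rotN < 2 ^ n := by
      have hr : rotN < 2 ^ n := by
        have : rotN ≤ 2 ^ n - 1 := Nat.and_le_right
        have := Nat.two_pow_pos n
        omega
      exact Nat.xor_lt_two_pow hmNlt hr
    -- B's transition count
    have hxor : PySem.Int.bxor (PySem.Int.band a ((2 ^ n - 1 : Nat) : Int))
        (PySem.Int.band (PySem.Int.bor (PySem.Int.band a ((2 ^ n - 1 : Nat) : Int) >>> 1)
          (PySem.Int.band a ((2 ^ n - 1 : Nat) : Int) <<< (P - 1).toNat))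
          ((2 ^ n - 1 : Nat) : Int)) = ((mN ^^^ rotN : Nat) : Int) := by
      rw [hrot, hm, heN, PySem.Int.bxor_natCast]
    have hK1 : ∀ k : Nat, PySem.Int.band (k : Int) ((k : Int) - 1) = ((k &&& (k - 1) : Nat) : Int) := by
      intro k
      rcases Nat.eq_zero_or_pos k with hk | hk
      · subst hk
        rw [show ((0 : Nat) : Int) - 1 = -1 by norm_num, PySem.Int.band_neg_one]
        simp
      · rw [show ((k : Int)) - 1 = ((k - 1 : Nat) : Int) by omega, PySem.Int.band_natCast]
    -- A's transition count
    have hbA : (PySem.List.pyRange 0 P 1).foldl (fun transitions i =>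
        if PySem.Int.band (a >>> i.toNat) 1 ≠ PySem.Int.band (a >>> (PySem.Int.mod (i + 1) P).toNat) 1
        then transitions + 1 else transitions) 0
        = ((List.range n).countP (fun k : Nat =>
            decide (PySem.Int.band (a >>> ((k : Int)).toNat) 1
              ≠ PySem.Int.band (a >>> (PySem.Int.mod ((k : Int) + 1) (n : Int)).toNat) 1)) : Int) := by
      rw [hPn, PySem.List.pyRange_zero_natCast, List.foldl_map]
      simp only [Int.shiftRight_natCast_right]
      have hbody : (fun (transitions : Int) (k : Nat) =>
          if PySem.Int.band (a >>> ((k : Int)).toNat) 1 ≠ PySem.Int.band (a >>> (PySem.Int.mod ((k : Int) + 1) ((n : Nat) : Int)).toNat) 1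
          then transitions + 1 else transitions)
          = (fun (transitions : Int) (k : Nat) =>
          if (fun k : Nat => decide (PySem.Int.band (a >>> ((k : Int)).toNat) 1
              ≠ PySem.Int.band (a >>> (PySem.Int.mod ((k : Int) + 1) (n : Int)).toNat) 1)) k = true
          then transitions + 1 else transitions) := by
        funext t k
        by_cases hc : PySem.Int.band (a >>> ((k : Int)).toNat) 1
            ≠ PySem.Int.band (a >>> (PySem.Int.mod ((k : Int) + 1) (n : Int)).toNat) 1
        · rw [if_pos hc, if_pos (by simpa using hc)]
        · rw [if_neg hc, if_neg (by simpa using hc)]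
      rw [hbody, PySem.List.foldl_count_if]
      simp
    have hmaskN : ((1 <<< n : Nat) : Int) - 1 = ((2 ^ n - 1 : Nat) : Int) := by
      rw [Nat.one_shiftLeft]
      have := Nat.two_pow_pos n
      omega
    rw [hbA, if_neg (not_le.mpr hP), hmaskN, hxor, hK1, hK1]
    -- the two counts agree pointwise on range n
    have hcnt : (List.range n).countP (fun k : Nat =>
            decide (PySem.Int.band (a >>> ((k : Int)).toNat) 1
              ≠ PySem.Int.band (a >>> (PySem.Int.mod ((k : Int) + 1) (n : Int)).toNat) 1))
        = (List.range n).countP (fun i => (mN ^^^ rotN).testBit i) := by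
      apply List.countP_congr
      intro k hk
      have hklt : k < n := List.mem_range.mp hk
      have hk1lt : (k + 1) % n < n := Nat.mod_lt _ hn
      have hcast : ((k : Int) + 1) = ((k + 1 : Nat) : Int) := by push_cast; ring
      have h1 := pvBit_eq_testBit a n k hklt
      have h2 := pvBit_eq_testBit a n ((k + 1) % n) hk1lt
      rw [← hmNdef] at h1 h2
      simp only [hcast, PySem.Int.mod_natCast, Int.toNat_natCast, Nat.testBit_xor]
      rw [hrotdef, pvRot_testBit mN n k hmNlt hn hklt]
      rcases pvBit01 a k with hb1 | hb1 <;>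
        rcases pvBit01 a ((k + 1) % n) with hb2 | hb2 <;>
          simp [hb1, hb2] at h1 h2 <;> simp [hb1, hb2, h1, h2]
    have hxc := pvBitCount_eq_countP n (mN ^^^ rotN) hxorlt
    apply if_congr _ rfl rfl
    rw [Int.natCast_eq_zero, pvKernighan (mN ^^^ rotN), hxc, hcnt]
    constructor
    · intro h; exact_mod_cast h
    · intro h; exact_mod_cast h

-- ===== VERDICT (by name: the statement is the Claim_ definition above) =====
theorem get_uniform_pattern_py_spec : Claim_equal_get_uniform_pattern_py := by
  intro pattern P _
  unfold Spec_get_uniform_pattern_py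
  exact pvMain pattern P
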